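-- pv_equiv track=rewrite | github.com/MakeSchool-17/twitter-bot-python-KavinSub | 4_stochasticv2.py | set_ranges
-- ===== SOURCE A (Python) =====
-- def set_ranges(histogram, types):
--
--     index = 0
--     ranges = []
--     for i in range(len(types)):
--         temp = histogram[types[i]]
--         ranges.append((index, index + temp - 1))
--         index += temp
--
--     return ranges
-- ===== SOURCE B (Python) =====
-- def set_ranges(histogram, types):
--     counts = [histogram[t] for t in types]
--     starts = []
--     s = 0
--     for c in counts:
--         starts.append(s)
--         s += c
--     return [(s, s + c - 1) for s, c in zip(starts, counts)]
-- ===== Notes on version B (the rewrite author's own statement) =====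
-- stated objective: alternative
-- what changed: Replaces the single interleaved loop (running index + range emission) by two separate stages: a count list and an explicit prefix-sum start table, then ranges formed by zipping starts with counts.
import Mathlib
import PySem

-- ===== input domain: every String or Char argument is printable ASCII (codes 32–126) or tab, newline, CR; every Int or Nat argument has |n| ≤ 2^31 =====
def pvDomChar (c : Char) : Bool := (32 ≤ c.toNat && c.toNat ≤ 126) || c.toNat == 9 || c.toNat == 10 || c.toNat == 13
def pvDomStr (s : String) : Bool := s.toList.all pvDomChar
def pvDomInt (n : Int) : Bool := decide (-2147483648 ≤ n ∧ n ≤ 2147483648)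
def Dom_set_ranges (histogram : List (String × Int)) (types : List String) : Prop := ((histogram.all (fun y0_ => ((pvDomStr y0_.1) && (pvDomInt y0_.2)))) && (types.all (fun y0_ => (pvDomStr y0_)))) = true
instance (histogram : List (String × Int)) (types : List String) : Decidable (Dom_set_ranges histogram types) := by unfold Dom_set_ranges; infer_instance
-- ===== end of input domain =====

-- B separates the interleaved loop of A into a count list, a prefix-sum start table and a zip pass (alternative decomposition, same cost).


-- ===== PORT A =====
-- one loop over types, carrying the running index and appending ranges
def set_ranges (histogram : List (String × Int)) (types : List String) : List (Int × Int) :=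
  (types.foldl
    (fun (st : Int × List (Int × Int)) t =>
      let temp := PySem.Dict.getD (PySem.Dict.mk histogram) t 0   -- Pre_ guarantees the key is present (else Python raises KeyError)
      (st.1 + temp, st.2 ++ [(st.1, st.1 + temp - 1)]))
    (0, [])).2

-- ===== PORT B =====
def set_ranges_alt (histogram : List (String × Int)) (types : List String) : List (Int × Int) :=
  let counts := types.map (fun t => PySem.Dict.getD (PySem.Dict.mk histogram) t 0)
  let starts := (counts.foldl
    (fun (st : Int × List Int) c => (st.1 + c, st.2 ++ [st.1])) (0, [])).2
  (starts.zip counts).map (fun sc => (sc.1, sc.1 + sc.2 - 1))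

-- ===== PRECONDITION & SPEC =====
-- Pre_ excludes inputs where some type is not a key of histogram: Python A raises KeyError there.
def Pre_set_ranges (histogram : List (String × Int)) (types : List String) : Prop :=
  ∀ t ∈ types, (PySem.Dict.get? (PySem.Dict.mk histogram) t).isSome
instance (histogram : List (String × Int)) (types : List String) : Decidable (Pre_set_ranges histogram types) := by unfold Pre_set_ranges; infer_instance
def pvWitness_set_ranges : (List (String × Int)) × List String := ([("a", 2), ("b", 0)], ["a", "b", "a"])

def Spec_set_ranges (histogram : List (String × Int)) (types : List String) (out : List (Int × Int)) : Prop := out = set_ranges_alt histogram types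
instance (histogram : List (String × Int)) (types : List String) (out : List (Int × Int)) : Decidable (Spec_set_ranges histogram types out) := by unfold Spec_set_ranges; infer_instance

-- ===== CLAIM (what is proved, stated in full; the proofs are below) =====
def Claim_equal_set_ranges : Prop := ∀ (histogram : List (String × Int)) (types : List String), Dom_set_ranges histogram types → Pre_set_ranges histogram types → Spec_set_ranges histogram types (set_ranges histogram types)

-- ===== LEMMAS AND PROOFS =====

-- reference recursion: ranges for counts cs starting at index i
def pvSpecRanges (i : Int) : List Int → List (Int × Int)
  | [] => []
  | c :: cs => (i, i + c - 1) :: pvSpecRanges (i + c) cs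

-- reference recursion: start offsets for counts cs starting at s
def pvStarts (s : Int) : List Int → List Int
  | [] => []
  | c :: cs => s :: pvStarts (s + c) cs

theorem pvA_fold (histogram : List (String × Int)) :
    ∀ (ts : List String) (i : Int) (acc : List (Int × Int)),
      (ts.foldl
        (fun (st : Int × List (Int × Int)) t =>
          let temp := PySem.Dict.getD (PySem.Dict.mk histogram) t 0
          (st.1 + temp, st.2 ++ [(st.1, st.1 + temp - 1)]))
        (i, acc)).2
      = acc ++ pvSpecRanges i (ts.map (fun t => PySem.Dict.getD (PySem.Dict.mk histogram) t 0)) := by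
  intro ts
  induction ts with
  | nil => intro i acc; simp [pvSpecRanges]
  | cons t ts ih => intro i acc; simp [pvSpecRanges, ih]

theorem pvStarts_fold :
    ∀ (cs : List Int) (s : Int) (acc : List Int),
      (cs.foldl (fun (st : Int × List Int) c => (st.1 + c, st.2 ++ [st.1])) (s, acc)).2
      = acc ++ pvStarts s cs := by
  intro cs
  induction cs with
  | nil => intro s acc; simp [pvStarts]
  | cons c cs ih => intro s acc; simp [pvStarts, ih]

theorem pvZip_spec :
    ∀ (cs : List Int) (s : Int),
      ((pvStarts s cs).zip cs).map (fun sc => (sc.1, sc.1 + sc.2 - 1)) = pvSpecRanges s cs := by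
  intro cs
  induction cs with
  | nil => intro s; simp [pvStarts, pvSpecRanges]
  | cons c cs ih => intro s; simp [pvStarts, pvSpecRanges, ih]

-- ===== VERDICT (by name: the statement is the Claim_ definition above) =====
theorem set_ranges_spec : Claim_equal_set_ranges := by
  intro histogram types _ _
  unfold Spec_set_ranges set_ranges set_ranges_alt
  simp only [pvA_fold, pvStarts_fold, pvZip_spec, List.nil_append]
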